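-- pv_equiv track=rewrite | github.com/Mohit-Chaudhari/Level-Up-Coding | Introduction to Problem Solving/smaller_and_greater.py | solve
-- ===== SOURCE A (Python) =====
-- def solve(A):
--     A.sort()
--     ln = len(A)
--     mini = A[0]
--     maxi = A[ln - 1]
--     cnt = 0
--
--     for i in range(ln):
--         if A[i] == mini or A[i] == maxi:
--             cnt += 1
--     return ln - cnt
-- ===== SOURCE B (Python) =====
-- # Count elements strictly between min and max by binary-searching the sorted
-- # array's boundaries instead of scanning and counting every element.
-- # Keeps A's in-place sort of the argument.
--
-- def _bisect_left(a, x):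
--     lo, hi = 0, len(a)
--     while lo < hi:
--         mid = (lo + hi) // 2
--         if a[mid] < x:
--             lo = mid + 1
--         else:
--             hi = mid
--     return lo
--
--
-- def _bisect_right(a, x):
--     lo, hi = 0, len(a)
--     while lo < hi:
--         mid = (lo + hi) // 2
--         if x < a[mid]:
--             hi = mid
--         else:
--             lo = mid + 1
--     return lo
--
--
-- def solve(A):
--     A.sort()
--     mini = A[0]
--     maxi = A[-1]
--     if mini == maxi:
--         return 0
--     return _bisect_left(A, maxi) - _bisect_right(A, mini)
-- ===== Notes on version B (the rewrite author's own statement) =====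
-- stated objective: alternative
-- what changed: Replaces the linear counting loop over the sorted array with two hand-written binary searches locating the boundaries of the slice of elements strictly between the minimum and the maximum; both programs still sort the argument in place.
import Mathlib
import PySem

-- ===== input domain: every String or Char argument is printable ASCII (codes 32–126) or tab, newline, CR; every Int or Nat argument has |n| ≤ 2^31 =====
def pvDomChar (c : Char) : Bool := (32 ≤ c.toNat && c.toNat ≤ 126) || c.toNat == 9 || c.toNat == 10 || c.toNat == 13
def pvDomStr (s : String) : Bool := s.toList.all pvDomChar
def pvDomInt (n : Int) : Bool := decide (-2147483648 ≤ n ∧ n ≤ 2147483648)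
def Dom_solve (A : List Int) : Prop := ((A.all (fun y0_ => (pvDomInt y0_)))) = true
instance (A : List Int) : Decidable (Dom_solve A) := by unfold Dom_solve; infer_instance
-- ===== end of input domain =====

-- B counts the elements strictly between min and max with two binary searches on the
-- sorted array instead of A's per-element counting loop; both sort the argument in
-- place, and the equivalence proved here is about the RETURN value.

-- ===== PORT A =====
def solve (A : List Int) : Int :=
  let S := PySem.List.sorted A (fun x => x) false      -- A.sort()
  let ln : Int := S.length
  let mini := PySem.List.pyGetD S 0 0                  -- first element
  let maxi := PySem.List.pyGetD S (ln - 1) 0           -- last element (index ln - 1)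
  let cnt : Int := (PySem.List.pyRange 0 ln 1).foldl
    (fun c i => if PySem.List.pyGetD S i 0 = mini ∨ PySem.List.pyGetD S i 0 = maxi
                then c + 1 else c) 0
  ln - cnt

-- ===== PORT B =====
-- Source B's _bisect_left/_bisect_right are the standard bisect loops; PySem.List.bisectLeft /
-- bisectRight are exactly that loop (lo/hi halving), so they are the faithful ports.
def solve_alt (A : List Int) : Int :=
  let S := PySem.List.sorted A (fun x => x) false      -- A.sort()
  let mini := PySem.List.pyGetD S 0 0                  -- first element
  let maxi := PySem.List.pyGetD S (-1) 0               -- last element (negative index)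
  if mini = maxi then 0
  else (PySem.List.bisectLeft S maxi : Int) - (PySem.List.bisectRight S mini : Int)

-- ===== PRECONDITION & SPEC =====
-- Pre_ excludes only the empty list, on which A raises IndexError reading its first element.
def Pre_solve (A : List Int) : Prop := A ≠ []
instance (A : List Int) : Decidable (Pre_solve A) := by unfold Pre_solve; infer_instance
def pvWitness_solve : List Int := ([3, 1, 2, 3])

def Spec_solve (A : List Int) (out : Int) : Prop := out = solve_alt A
instance (A : List Int) (out : Int) : Decidable (Spec_solve A out) := by unfold Spec_solve; infer_instance

-- ===== CLAIM (what is proved, stated in full; the proofs are below) =====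
def Claim_equal_solve : Prop := ∀ (A : List Int), Dom_solve A → Pre_solve A → Spec_solve A (solve A)

-- ===== LEMMAS AND PROOFS =====

-- If membership below index k is exactly predicate P, then countP P = k.
lemma countP_eq_of_index (S : List Int) (P : Int → Bool) (k : Nat) (hk : k ≤ S.length)
    (h1 : ∀ (j : Nat) (hj : j < S.length), j < k → P S[j])
    (h2 : ∀ (j : Nat) (hj : j < S.length), k ≤ j → ¬ P S[j]) :
    S.countP P = k := by
  have hsplit : S = S.take k ++ S.drop k := (List.take_append_drop k S).symm
  rw [hsplit, List.countP_append]
  have htake : (S.take k).countP P = (S.take k).length := by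
    apply List.countP_eq_length.mpr
    intro a ha
    obtain ⟨j, hj, rfl⟩ := List.mem_iff_getElem.mp ha
    have hjk : j < k := lt_of_lt_of_le hj (by simp [List.length_take])
    have hjS : j < S.length := lt_of_lt_of_le hjk hk
    have := h1 j hjS hjk
    simpa [List.getElem_take] using this
  have hdrop : (S.drop k).countP P = 0 := by
    apply List.countP_eq_zero.mpr
    intro a ha
    obtain ⟨j, hj, rfl⟩ := List.mem_iff_getElem.mp ha
    have hjS : k + j < S.length := by
      have := hj; simp [List.length_drop] at this; omega
    have := h2 (k + j) hjS (Nat.le_add_right k j)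
    simpa [List.getElem_drop] using this
  rw [htake, hdrop, List.length_take]
  omega

-- countP of a disjunction of pointwise-disjoint predicates splits into a sum.
lemma countP_or_disjoint (S : List Int) (p q : Int → Bool)
    (hd : ∀ x ∈ S, ¬ (p x ∧ q x)) :
    S.countP (fun x => p x || q x) = S.countP p + S.countP q := by
  induction S with
  | nil => simp
  | cons a t ih =>
    have hdt : ∀ x ∈ t, ¬ (p x ∧ q x) := fun x hx => hd x (List.mem_cons_of_mem a hx)
    have hda := hd a (List.mem_cons_self)
    by_cases hp : p a <;> by_cases hq : q a <;>
      simp [hp, hq, ih hdt] at hda ⊢ <;> omega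

-- ===== VERDICT (by name: the statement is the Claim_ definition above) =====
theorem solve_spec : Claim_equal_solve := by
  intro A _ hpre
  unfold Spec_solve solve solve_alt
  dsimp only
  set S := PySem.List.sorted A (fun x => x) false with hSdef
  have hSne : S ≠ [] := by
    rw [hSdef]
    simpa [PySem.List.sorted_eq_nil_iff] using hpre
  have hlen : 0 < S.length := List.length_pos_iff.mpr hSne
  have hP : S.Pairwise (· ≤ ·) := by
    simpa [hSdef] using PySem.List.sorted_pairwise A (fun x => x)
  have hmono : ∀ (p q : Nat) (hpq : p ≤ q) (hq : q < S.length), S[p]'(by omega) ≤ S[q] := by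
    intro p q hpq hq
    exact PySem.List.sorted_id_getElem_mono A hpq hq
  have hmn : PySem.List.pyGetD S 0 0 = S[0]'hlen := by
    rw [PySem.List.pyGetD_eq_getElem S 0 (by omega) (by exact_mod_cast hlen)]
    simp
  have hmx : PySem.List.pyGetD S ((S.length : Int) - 1) 0 = S[S.length - 1]'(by omega) := by
    rw [PySem.List.pyGetD_eq_getElem S 0 (by omega) (by omega)]
    congr 1
    omega
  have hmx' : PySem.List.pyGetD S (-1) 0 = S[S.length - 1]'(by omega) := by
    rw [PySem.List.pyGetD_neg_ofNat S 1 0 (by omega) (by omega)]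
  set mn := S[0]'hlen with hmndef
  set mx := S[S.length - 1]'(by omega) with hmxdef
  have hlo : ∀ (j : Nat) (hj : j < S.length), mn ≤ S[j] := fun j hj => hmono 0 j (Nat.zero_le j) hj
  have hhi : ∀ (j : Nat) (hj : j < S.length), S[j] ≤ mx := by
    intro j hj
    have := hmono j (S.length - 1) (by omega) (by omega)
    simpa using this
  -- A's loop is a countP
  have hloop : (PySem.List.pyRange 0 (S.length : Int) 1).foldl
      (fun c i => if PySem.List.pyGetD S i 0 = mn ∨ PySem.List.pyGetD S i 0 = mx
                  then c + 1 else c) 0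
      = (S.countP (fun x => decide (x = mn) || decide (x = mx)) : Int) := by
    rw [PySem.List.foldl_pyRange_zero_pyGetD' S 0
      (fun (c : Int) (x : Int) => if x = mn ∨ x = mx then c + 1 else c) 0]
    rw [PySem.List.foldl_ite_add_one]
    simp [List.countP]
  rw [hmn, hmx, hmx', hloop]
  by_cases heq : mn = mx
  · -- all elements equal: A's count is the whole length
    rw [if_pos heq, heq]
    have hall : S.countP (fun x => decide (x = mx) || decide (x = mx)) = S.length := by
      apply List.countP_eq_length.mpr
      intro a ha
      obtain ⟨j, hj, rfl⟩ := List.mem_iff_getElem.mp ha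
      have h1 := hlo j hj
      have h2 := hhi j hj
      have : S[j] = mx := by omega
      simp [this]
    rw [hall]
    omega
  · simp only [if_neg heq]
    obtain ⟨hL1, hL2, hL3⟩ := PySem.List.bisectLeft_spec S mx hP
    obtain ⟨hR1, hR2, hR3⟩ := PySem.List.bisectRight_spec S mn hP
    set L := PySem.List.bisectLeft S mx with hLdef
    set R := PySem.List.bisectRight S mn with hRdef
    have hcL : S.countP (fun x => decide (x < mx)) = L :=
      countP_eq_of_index S _ L hL1
        (fun j hj hjL => by simpa using hL2 j hj hjL)
        (fun j hj hLj => by simpa using not_lt.mpr (hL3 j hj hLj))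
    have hcR : S.countP (fun x => decide (x ≤ mn)) = R :=
      countP_eq_of_index S _ R hR1
        (fun j hj hjR => by simpa using hR2 j hj hjR)
        (fun j hj hRj => by simpa using not_le.mpr (hR3 j hj hRj))
    -- split A's count into the two extremes
    have hsplit : S.countP (fun x => decide (x = mn) || decide (x = mx))
        = S.countP (fun x => decide (x ≤ mn)) + S.countP (fun x => !decide (x < mx)) := by
      have hcongr : S.countP (fun x => decide (x = mn) || decide (x = mx))
          = S.countP (fun x => decide (x ≤ mn) || !decide (x < mx)) := by
        apply List.countP_congr
        intro a ha
        obtain ⟨j, hj, rfl⟩ := List.mem_iff_getElem.mp ha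
        have h1 := hlo j hj
        have h2 := hhi j hj
        simp only [Bool.or_eq_true, decide_eq_true_eq, Bool.not_eq_true', decide_eq_false_iff_not, not_lt]
        constructor
        · rintro (h | h) <;> omega
        · rintro (h | h)
          · left; omega
          · right; omega
      rw [hcongr]
      apply countP_or_disjoint
      intro x hx
      obtain ⟨j, hj, rfl⟩ := List.mem_iff_getElem.mp hx
      rintro ⟨h1, h2⟩
      simp only [decide_eq_true_eq, Bool.not_eq_true', decide_eq_false_iff_not, not_lt] at h1 h2
      have hne : mn ≠ mx := heq
      have := hlo j hj
      have := hhi j hj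
      omega
    have hsum : S.length = (S.countP fun x => decide (x < mx)) + S.countP (fun x => !decide (x < mx)) := by
      rw [List.length_eq_countP_add_countP (l := S) (p := fun x => decide (x < mx))]
      congr 1
      apply List.countP_congr
      intro a _
      simp
    rw [hsplit, hcR]
    omega
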